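-- pv_equiv track=rewrite | github.com/msk-access/krewlyzer | src/krewlyzer/core/motif_processor.py | compute_1mer_from_kmer
-- ===== SOURCE A (Python) =====
-- from typing import Dict
--
-- def compute_1mer_from_kmer(em_counts: Dict[str, int]) -> Dict[str, int]:
--     """
--     Compute 1-mer (single base) counts from k-mer counts.
--
--     Aggregates k-mer counts by their first base, which represents
--     the fragment end base. This avoids needing Rust changes.
--
--     Args:
--         em_counts: Dictionary of k-mer -> count (e.g., 4-mers)
--
--     Returns:
--         Dictionary of 1-mer (A/C/G/T) -> count
--
--     Example:
--         >>> em_counts = {'ACGT': 100, 'ATTT': 50, 'CGAT': 75, 'GGGG': 25}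
--         >>> compute_1mer_from_kmer(em_counts)
--         {'A': 150, 'C': 75, 'G': 25, 'T': 0}
--     """
--     counts_1mer: Dict[str, int] = {"A": 0, "C": 0, "G": 0, "T": 0}
--
--     for kmer, count in em_counts.items():
--         if len(kmer) >= 1:
--             first_base = kmer[0].upper()
--             if first_base in counts_1mer:
--                 counts_1mer[first_base] += count
--
--     return counts_1mer
-- ===== SOURCE B (Python) =====
-- def compute_1mer_from_kmer(em_counts):
--     """Aggregate k-mer counts by first base: one filtered sum per base in 'ACGT'."""
--     return {base: sum(c for k, c in em_counts.items() if k and k[0].upper() == base)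
--             for base in "ACGT"}
-- ===== Notes on version B (the rewrite author's own statement) =====
-- stated objective: simpler
-- what changed: Replaces the single accumulating pass that dispatches each k-mer into a mutable 4-key dict with a dict comprehension over the fixed alphabet 'ACGT', computing each output count as an independent filtered sum over the items.
import Mathlib
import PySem

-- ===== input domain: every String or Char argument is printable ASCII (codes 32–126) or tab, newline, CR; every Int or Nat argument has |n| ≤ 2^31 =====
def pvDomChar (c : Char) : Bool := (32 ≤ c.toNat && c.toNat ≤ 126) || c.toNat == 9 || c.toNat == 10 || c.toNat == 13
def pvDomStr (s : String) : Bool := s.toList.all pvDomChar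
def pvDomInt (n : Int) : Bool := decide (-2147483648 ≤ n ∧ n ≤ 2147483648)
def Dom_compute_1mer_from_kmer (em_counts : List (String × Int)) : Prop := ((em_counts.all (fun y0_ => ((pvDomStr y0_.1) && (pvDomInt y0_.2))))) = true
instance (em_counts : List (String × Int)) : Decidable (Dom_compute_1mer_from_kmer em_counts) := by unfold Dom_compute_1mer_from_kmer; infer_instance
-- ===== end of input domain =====

-- B computes each of the four counts as an independent filtered sum over the items
-- (a comprehension over the fixed alphabet) instead of A's single accumulating pass
-- dispatching each k-mer into a mutable 4-key dict; same cost, simpler decomposition.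

-- ===== PORT A =====
-- A's loop body: skip empty keys, upper-case the first character (a 1-char string in
-- Python; equality of 1-char strings is equality of the characters), and bump the
-- bucket when it is one of the dict's keys.
def pvStepA (d : PySem.Dict String Int) (p : String × Int) : PySem.Dict String Int :=
  if 1 ≤ PySem.Str.len p.1 then
    match PySem.Str.pyGet? p.1 0 with
    | some ch =>
        let first_base := PySem.Str.upper (String.ofList [ch])
        if d.contains first_base then d.modify first_base 0 (· + p.2) else d
    | none => d
  else d

def compute_1mer_from_kmer (em_counts : List (String × Int)) : List (String × Int) :=
  let counts_1mer : PySem.Dict String Int :=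
    PySem.Dict.ofList [("A", 0), ("C", 0), ("G", 0), ("T", 0)]
  (em_counts.foldl pvStepA counts_1mer).items

-- ===== PORT B =====
-- 'k and k[0].upper() == base': true iff k is nonempty and its upper-cased first
-- character equals the base character.
def pvMatches (b : Char) (p : String × Int) : Bool :=
  match p.1.toList with
  | [] => false
  | c :: _ => PySem.Chars.upperChar c == b

def compute_1mer_from_kmer_alt (em_counts : List (String × Int)) : List (String × Int) :=
  ("ACGT".toList).map (fun base =>
    (String.ofList [base], ((em_counts.filter (pvMatches base)).map (·.2)).sum))

-- ===== PRECONDITION & SPEC =====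
def Spec_compute_1mer_from_kmer (em_counts : List (String × Int)) (out : List (String × Int)) : Prop := out = compute_1mer_from_kmer_alt em_counts
instance (em_counts : List (String × Int)) (out : List (String × Int)) : Decidable (Spec_compute_1mer_from_kmer em_counts out) := by unfold Spec_compute_1mer_from_kmer; infer_instance

-- ===== CLAIM (what is proved, stated in full; the proofs are below) =====
def Claim_equal_compute_1mer_from_kmer : Prop := ∀ (em_counts : List (String × Int)), Dom_compute_1mer_from_kmer em_counts → Spec_compute_1mer_from_kmer em_counts (compute_1mer_from_kmer em_counts)

-- ===== LEMMAS AND PROOFS =====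

def pvSumFor (b : Char) (xs : List (String × Int)) : Int :=
  ((xs.filter (pvMatches b)).map (·.2)).sum

theorem pvLoopInv (xs : List (String × Int)) (a c g t : Int) :
    xs.foldl pvStepA (PySem.Dict.mk [("A", a), ("C", c), ("G", g), ("T", t)]) =
      PySem.Dict.mk [("A", a + pvSumFor 'A' xs), ("C", c + pvSumFor 'C' xs),
                     ("G", g + pvSumFor 'G' xs), ("T", t + pvSumFor 'T' xs)] := by
  induction xs generalizing a c g t with
  | nil => simp [pvSumFor]
  | cons p xs ih =>
    obtain ⟨k, cnt⟩ := p
    show List.foldl pvStepA (pvStepA _ (k, cnt)) xs = _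
    rcases hk : k.toList with _ | ⟨ch, rest⟩
    · have hstep : pvStepA (PySem.Dict.mk [("A", a), ("C", c), ("G", g), ("T", t)]) (k, cnt)
          = PySem.Dict.mk [("A", a), ("C", c), ("G", g), ("T", t)] := by
        simp [pvStepA, PySem.Str.len, hk]
      rw [hstep, ih]
      simp [pvSumFor, pvMatches, hk]
    · have hget : PySem.Str.pyGet? k 0 = some ch := by
        simp [PySem.Str.pyGet?, hk]
      have hfb : PySem.Str.upper (String.ofList [ch])
          = String.ofList [PySem.Chars.upperChar ch] := by
        simp [PySem.Str.upper, PySem.Chars.upper]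
      have hlen : 1 ≤ PySem.Str.len k := by simp [PySem.Str.len, hk]
      have hlen2 : 1 ≤ k.length := by simpa using hlen
      set u := PySem.Chars.upperChar ch with hu
      by_cases hA : u = 'A'
      · have hstep : pvStepA (PySem.Dict.mk [("A", a), ("C", c), ("G", g), ("T", t)]) (k, cnt)
            = PySem.Dict.mk [("A", a + cnt), ("C", c), ("G", g), ("T", t)] := by
          simp only [pvStepA, hget, hfb, hA,
            show String.ofList ['A'] = "A" from rfl]
          simp [PySem.Dict.contains, PySem.Dict.modify, PySem.Dict.insert,
            PySem.Dict.getD, PySem.Dict.get?, hlen2]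
        rw [hstep, ih]
        simp [pvSumFor, pvMatches, hk, ← hu, hA, add_assoc, add_comm cnt]
      · by_cases hC : u = 'C'
        · have hstep : pvStepA (PySem.Dict.mk [("A", a), ("C", c), ("G", g), ("T", t)]) (k, cnt)
              = PySem.Dict.mk [("A", a), ("C", c + cnt), ("G", g), ("T", t)] := by
            simp only [pvStepA, hget, hfb, hC,
              show String.ofList ['C'] = "C" from rfl]
            simp [PySem.Dict.contains, PySem.Dict.modify, PySem.Dict.insert,
              PySem.Dict.getD, PySem.Dict.get?, hlen2]
          rw [hstep, ih]
          simp [pvSumFor, pvMatches, hk, ← hu, hC, add_assoc, add_comm cnt]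
        · by_cases hG : u = 'G'
          · have hstep : pvStepA (PySem.Dict.mk [("A", a), ("C", c), ("G", g), ("T", t)]) (k, cnt)
                = PySem.Dict.mk [("A", a), ("C", c), ("G", g + cnt), ("T", t)] := by
              simp only [pvStepA, hget, hfb, hG,
                show String.ofList ['G'] = "G" from rfl]
              simp [PySem.Dict.contains, PySem.Dict.modify, PySem.Dict.insert,
                PySem.Dict.getD, PySem.Dict.get?, hlen2]
            rw [hstep, ih]
            simp [pvSumFor, pvMatches, hk, ← hu, hG, add_assoc, add_comm cnt]
          · by_cases hT : u = 'T'
            · have hstep : pvStepA (PySem.Dict.mk [("A", a), ("C", c), ("G", g), ("T", t)]) (k, cnt)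
                  = PySem.Dict.mk [("A", a), ("C", c), ("G", g), ("T", t + cnt)] := by
                simp only [pvStepA, hget, hfb, hT,
                  show String.ofList ['T'] = "T" from rfl]
                simp [PySem.Dict.contains, PySem.Dict.modify, PySem.Dict.insert,
                  PySem.Dict.getD, PySem.Dict.get?, hlen2]
              rw [hstep, ih]
              simp [pvSumFor, pvMatches, hk, ← hu, hT, add_assoc, add_comm cnt]
            · have hne : ∀ b : Char, b ∈ ['A', 'C', 'G', 'T'] → ¬ String.ofList [b] = String.ofList [u] := by
                intro b hb heq
                have hbu : b = u := by
                  have := congrArg String.toList heq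
                  simpa using this
                fin_cases hb
                · exact hA hbu.symm
                · exact hC hbu.symm
                · exact hG hbu.symm
                · exact hT hbu.symm
              have hstep : pvStepA (PySem.Dict.mk [("A", a), ("C", c), ("G", g), ("T", t)]) (k, cnt)
                  = PySem.Dict.mk [("A", a), ("C", c), ("G", g), ("T", t)] := by
                simp only [pvStepA, hget, hfb]
                have h1 : ¬ (("A" : String) = String.ofList [u]) := hne 'A' (by simp)
                have h2 : ¬ (("C" : String) = String.ofList [u]) := hne 'C' (by simp)
                have h3 : ¬ (("G" : String) = String.ofList [u]) := hne 'G' (by simp)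
                have h4 : ¬ (("T" : String) = String.ofList [u]) := hne 'T' (by simp)
                simp only [PySem.Dict.contains]
                simp [h1, h2, h3, h4, hlen2]
              rw [hstep, ih]
              have : ∀ b : Char, b ∈ ['A', 'C', 'G', 'T'] →
                  pvSumFor b ((k, cnt) :: xs) = pvSumFor b xs := by
                intro b hb
                have : (u == b) = false := by
                  fin_cases hb <;> simp_all
                simp [pvSumFor, pvMatches, hk, ← hu, this]
              rw [this 'A' (by simp), this 'C' (by simp), this 'G' (by simp), this 'T' (by simp)]

-- ===== VERDICT (by name: the statement is the Claim_ definition above) =====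
theorem compute_1mer_from_kmer_spec : Claim_equal_compute_1mer_from_kmer := by
  intro em_counts _
  show compute_1mer_from_kmer em_counts = compute_1mer_from_kmer_alt em_counts
  show (em_counts.foldl pvStepA
      (PySem.Dict.mk [("A", 0), ("C", 0), ("G", 0), ("T", 0)])).items
    = compute_1mer_from_kmer_alt em_counts
  rw [pvLoopInv]
  simp only [compute_1mer_from_kmer_alt, show "ACGT".toList = ['A', 'C', 'G', 'T'] from rfl,
    List.map, pvSumFor, zero_add]
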